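-- pv_equiv track=rewrite | github.com/KanuLiko/2021 | 2048/2048.py | is_row_change
-- ===== SOURCE A (Python) =====
-- def is_row_change(row):
--     def is_change(i):
--         if row[i] == 0 and row[i+1] != 0:
--             return True
--         if row[i] != 0 and row[i] == row[i+1]:
--             return True
--         return False
--     return any([is_change(index) for index in range(len(row)-1)])
-- ===== SOURCE B (Python) =====
-- def is_row_change(row):
--     tiles = [x for x in row if x != 0]
--     merged = []
--     i = 0
--     while i < len(tiles):
--         if i + 1 < len(tiles) and tiles[i] == tiles[i + 1]:
--             merged.append(tiles[i] * 2)
--             i += 2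
--         else:
--             merged.append(tiles[i])
--             i += 1
--     merged += [0] * (len(row) - len(merged))
--     return merged != row
-- ===== Notes on version B (the rewrite author's own statement) =====
-- stated objective: alternative
-- what changed: B simulates the actual 2048 left-shift (compact nonzero tiles, merge equal adjacent pairs once, pad with zeros) and compares the resulting row to the input, instead of scanning adjacent index pairs for a change condition.
import Mathlib
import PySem

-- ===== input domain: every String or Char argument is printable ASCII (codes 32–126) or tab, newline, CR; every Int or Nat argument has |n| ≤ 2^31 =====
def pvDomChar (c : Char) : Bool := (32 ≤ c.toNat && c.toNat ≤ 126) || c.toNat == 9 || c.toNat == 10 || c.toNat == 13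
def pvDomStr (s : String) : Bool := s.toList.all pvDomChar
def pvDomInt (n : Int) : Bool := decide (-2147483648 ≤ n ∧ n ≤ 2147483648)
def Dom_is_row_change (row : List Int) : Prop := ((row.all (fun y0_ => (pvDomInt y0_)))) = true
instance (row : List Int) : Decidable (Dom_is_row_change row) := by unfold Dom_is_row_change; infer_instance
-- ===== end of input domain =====

-- B replaces A's adjacent-pair change scan by actually simulating the 2048 left-shift
-- (compact nonzero tiles, merge equal adjacent pairs, pad with zeros) and comparing the
-- shifted row to the input (alternative decomposition, same cost).

-- ===== PORT A =====
-- is_change reads row[i] and row[i+1]; for i in range(len(row)-1) both indices are always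
-- in range, so pyGetD is exact here (Python never raises in A).
def is_row_change (row : List Int) : Bool :=
  let is_change : Int → Bool := fun i =>
    if PySem.List.pyGetD row i 0 == 0 && PySem.List.pyGetD row (i + 1) 0 != 0 then true
    else if PySem.List.pyGetD row i 0 != 0 &&
            PySem.List.pyGetD row i 0 == PySem.List.pyGetD row (i + 1) 0 then true
    else false
  ((PySem.List.pyRange 0 ((row.length : Int) - 1) 1).map is_change).any id

-- ===== PORT B =====
-- the while-loop over the tile pointer of Source B, as the obvious structural recursion
def pvMerge : List Int → List Int
  | [] => []
  | [x] => [x]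
  | x :: y :: t => if x == y then x * 2 :: pvMerge t else x :: pvMerge (y :: t)

def is_row_change_alt (row : List Int) : Bool :=
  let tiles := row.filter (fun x => x != 0)
  let merged := pvMerge tiles
  let padded := merged ++ List.replicate (row.length - merged.length) 0
  padded != row

-- ===== PRECONDITION & SPEC =====
def Spec_is_row_change (row : List Int) (out : Bool) : Prop := out = is_row_change_alt row
instance (row : List Int) (out : Bool) : Decidable (Spec_is_row_change row out) := by unfold Spec_is_row_change; infer_instance

-- ===== CLAIM (what is proved, stated in full; the proofs are below) =====
def Claim_equal_is_row_change : Prop := ∀ (row : List Int), Dom_is_row_change row → Spec_is_row_change row (is_row_change row)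

-- ===== LEMMAS AND PROOFS =====

-- A's adjacent-pair scan as a structural recursion
def pvChg : List Int → Bool
  | a :: b :: t => ((a == 0 && b != 0) || (a != 0 && a == b)) || pvChg (b :: t)
  | _ => false

-- the shifted row B compares against
def pvPadded (row : List Int) : List Int :=
  pvMerge (row.filter (fun x => x != 0)) ++
    List.replicate (row.length - (pvMerge (row.filter (fun x => x != 0))).length) 0

lemma alt_eq (row : List Int) :
    is_row_change_alt row = !(pvPadded row == row) := by
  simp [is_row_change_alt, pvPadded, bne]

lemma any_eq_chg : ∀ r : List Int,
      (List.range (r.length - 1)).any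
        (fun k => ((r.getD k 0 == 0 && r.getD (k+1) 0 != 0) ||
                   (r.getD k 0 != 0 && r.getD k 0 == r.getD (k+1) 0))) = pvChg r := by
    intro r
    induction r using pvChg.induct with
    | case1 a b t ih =>
      simp only [List.length_cons, Nat.add_sub_cancel, List.getD_cons_succ] at ih
      simp only [List.length_cons]
      rw [show t.length + 1 + 1 - 1 = (t.length + 1) from rfl, List.range_succ_eq_map]
      simp only [List.any_cons, List.any_map, Function.comp_def, List.getD_cons_zero,
        List.getD_cons_succ, pvChg]
      rw [ih]
    | case2 r h =>
      rcases r with _ | ⟨x, _ | ⟨y, t⟩⟩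
      · simp [pvChg]
      · simp [pvChg]
      · exact absurd rfl (h x y t)

lemma A_eq_chg (row : List Int) : is_row_change row = pvChg row := by
  rw [← any_eq_chg]
  simp only [is_row_change, PySem.List.pyRange_one, List.any_map, Function.comp_def,
    Int.sub_zero, zero_add]
  have hn : (((row.length : Int) - 1)).toNat = row.length - 1 := by omega
  rw [hn]
  refine PySem.List.any_congr_mem (fun k hk => ?_)
  have hc : (↑k + 1 : Int) = ((k+1 : Nat) : Int) := by push_cast; ring
  rw [hc]
  simp only [PySem.List.pyGetD_natCast, List.getD_eq_getElem?_getD]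
  have hbeq : ∀ a b : Int, (a == b) = decide (a = b) := fun a b => by
    by_cases h : a = b <;> simp [h]
  simp [hbeq, bne]

lemma chg_zero (t : List Int) : pvChg (0 :: t) = t.any (fun x => x != 0) := by
  induction t with
  | nil => simp [pvChg]
  | cons b s ih =>
    by_cases hb : b = 0
    · subst hb; simp [pvChg] at ih ⊢; exact ih
    · have hbt : (b != 0) = true := by simp [hb]
      simp [pvChg, hbt]

lemma chg_allzero (a : Int) (t : List Int) (h : ∀ x ∈ t, x = 0) : pvChg (a :: t) = false := by
  cases t with
  | nil => simp [pvChg]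
  | cons b s =>
    have hb : b = 0 := h b (by simp)
    subst hb
    have hs : pvChg (0 :: s) = false := by
      rw [chg_zero]
      simp only [List.any_eq_false]
      intro x hx; simp [h x (by simp [hx])]
    by_cases ha : a = 0 <;> simp [pvChg, ha, hs]

lemma chg_first_nonzero (a : Int) (t : List Int) (ha : a ≠ 0)
    (h : (t.filter (fun x => x != 0)).head? = some a) : pvChg (a :: t) = true := by
  cases t with
  | nil => simp at h
  | cons b s =>
    by_cases hb : b = 0
    · subst hb
      have ha' : a ∈ List.filter (fun x => x != 0) (0 :: s) := List.mem_of_mem_head? (Option.mem_def.mpr h)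
      have hmem : a ∈ s := by
        simp at ha'; exact ha'.1
      have h1 : pvChg (a :: 0 :: s) =
          (((a == 0 && ((0:Int) != 0)) || (a != 0 && a == 0)) || pvChg (0 :: s)) := rfl
      rw [h1, chg_zero]
      simp [ha]
      exact ⟨a, hmem, ha⟩
    · have hba : b = a := by
        simp [hb] at h
        exact h
      subst hba
      simp [pvChg, hb]

lemma merge_cons_head (x : Int) (l : List Int) :
    ∃ h r, pvMerge (x :: l) = h :: r ∧ (h = x ∨ h = x * 2) := by
  cases l with
  | nil => exact ⟨x, [], rfl, Or.inl rfl⟩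
  | cons y s =>
    by_cases hxy : x = y
    · exact ⟨x * 2, pvMerge s, by simp [pvMerge, hxy], Or.inr rfl⟩
    · exact ⟨x, pvMerge (y :: s), by simp [pvMerge, hxy], Or.inl rfl⟩

lemma allzero_replicate (t : List Int) (h : ∀ x ∈ t, x = 0) :
    List.replicate t.length 0 = t :=
  (List.eq_replicate_iff.mpr ⟨rfl, h⟩).symm

lemma chg_iff_padded (row : List Int) : pvChg row = false ↔ pvPadded row = row := by
  induction row with
  | nil => simp [pvChg, pvPadded, pvMerge]
  | cons a t ih =>
    by_cases ha : a = 0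
    · subst ha
      rw [chg_zero]
      constructor
      · intro h
        have hall : ∀ x ∈ t, x = 0 := by
          simp only [List.any_eq_false] at h
          intro x hx; have := h x hx; simpa using this
        have hf : List.filter (fun x => x != 0) (0 :: t) = [] := by
          simp only [List.filter_eq_nil_iff]
          intro x hx; rcases List.mem_cons.mp hx with h0 | h0
          · simp [h0]
          · simp [hall x h0]
        simp only [pvPadded, hf]
        show pvMerge [] ++ _ = _
        simp only [pvMerge, List.nil_append, List.length_nil, List.length_cons, Nat.sub_zero]
        rw [List.replicate_succ]
        rw [allzero_replicate t hall]
      · intro h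
        by_contra hany
        rw [Bool.not_eq_false, List.any_eq_true] at hany
        rcases hany with ⟨x, hx, hx0⟩
        have hx0 : x ≠ 0 := by simpa using hx0
        have hf : List.filter (fun x => x != 0) (0 :: t) = List.filter (fun x => x != 0) t := by
          simp
        rcases hcl : List.filter (fun x => x != 0) t with _ | ⟨c, l⟩
        · exact hx0 (by have := List.filter_eq_nil_iff.mp hcl x hx; simpa using this)
        · have hc : c ≠ 0 := by
            have : c ∈ List.filter (fun x => x != 0) t := by rw [hcl]; simp
            simpa using (List.mem_filter.mp this).2
          rcases merge_cons_head c l with ⟨hd, r, hmr, hhd⟩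
          have hhd0 : hd ≠ 0 := by
            rcases hhd with h1 | h1 <;> subst h1 <;>
              first | exact hc | (intro hc2; exact hc (by omega))
          rw [pvPadded, hf, hcl, hmr] at h
          have : hd = 0 := by
            have := congrArg (fun l => l.head?) h
            simpa using this
          exact hhd0 this
    · -- a ≠ 0
      rcases hf : List.filter (fun x => x != 0) t with _ | ⟨c, l⟩
      · -- t all zero: no change on both sides
        have hall : ∀ x ∈ t, x = 0 := by
          intro x hx
          by_contra hx0
          have : x ∈ List.filter (fun x => x != 0) t := List.mem_filter.mpr ⟨hx, by simpa using hx0⟩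
          simp [hf] at this
        rw [chg_allzero a t hall]
        simp only [true_iff]
        have hfa : List.filter (fun x => x != 0) (a :: t) = [a] := by
          simp [ha, hf]
        rw [pvPadded, hfa]
        show pvMerge [a] ++ _ = _
        simp only [pvMerge, List.length_cons]
        show [a] ++ List.replicate (t.length + 1 - 1) 0 = a :: t
        simp only [Nat.add_sub_cancel]
        rw [allzero_replicate t hall]
        rfl
      · have hfa : List.filter (fun x => x != 0) (a :: t) = a :: c :: l := by
          simp [ha, hf]
        have hc : c ≠ 0 := by
          have : c ∈ List.filter (fun x => x != 0) t := by rw [hf]; simp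
          simpa using (List.mem_filter.mp this).2
        by_cases hac : a = c
        · -- a merge fires at the front: both sides report a change
          have hchg : pvChg (a :: t) = true := by
            apply chg_first_nonzero a t ha
            rw [hf, hac]
            rfl
          rw [hchg]
          simp only [Bool.true_eq_false, false_iff]
          intro hpad
          have hm : pvMerge (a :: c :: l) = a * 2 :: pvMerge l := by
            simp [pvMerge, hac]
          rw [pvPadded, hfa, hm] at hpad
          have : a * 2 = a := by
            have := congrArg (fun l => l.head?) hpad
            simpa using this
          exact ha (by omega)
        · -- no merge at the front: both sides reduce to the tail
          have hm : pvMerge (a :: c :: l) = a :: pvMerge (c :: l) := by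
            simp [pvMerge, hac]
          have hpad : pvPadded (a :: t) = a :: pvPadded t := by
            rw [pvPadded, pvPadded, hfa, hm, hf]
            simp only [List.length_cons, List.cons_append]
            rw [Nat.succ_sub_succ]
          have hchg : pvChg (a :: t) = pvChg t := by
            cases t with
            | nil => simp at hf
            | cons b s =>
              by_cases hb : b = 0
              · subst hb
                show (((a == 0 && ((0:Int) != 0)) || (a != 0 && a == 0)) || pvChg (0 :: s)) = pvChg (0 :: s)
                simp [ha]
              · have hbc : b = c := by
                  simp [hb] at hf
                  exact hf.1
                show (((a == 0 && (b != 0)) || (a != 0 && a == b)) || pvChg (b :: s)) = pvChg (b :: s)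
                have : (a == b) = false := by simp [hbc, hac]
                simp [ha, this]
          rw [hchg, hpad, ih]
          constructor
          · intro h; rw [h]
          · intro h; exact (List.cons.injEq _ _ _ _ ▸ h).2

-- ===== VERDICT (by name: the statement is the Claim_ definition above) =====
theorem is_row_change_spec : Claim_equal_is_row_change := by
  intro row _
  unfold Spec_is_row_change
  rw [A_eq_chg, alt_eq]
  rcases h : pvChg row with _ | _
  · simp [(chg_iff_padded row).mp h]
  · have : ¬ pvPadded row = row := fun he => by
      simp [(chg_iff_padded row).mpr he] at h
    simp [this]
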